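-- pv_equiv track=rewrite | github.com/Prangejet/EdibleMicrobes | Statistical significance test/calculate_abbreviation_significance_anova_tukey.py | compact_letter_display
-- ===== SOURCE A (Python) =====
-- def excel_letter(index: int) -> str:
--     result = ""
--     current = index
--     while True:
--         current, rem = divmod(current, 26)
--         result = chr(97 + rem) + result
--         if current == 0:
--             return result
--         current -= 1
--
-- def compact_letter_display(
--     groups: list[str], nonsignificant: dict[str, dict[str, bool]]
-- ) -> dict[str, str]:
--     letter_groups: list[list[str]] = []
--     assigned: dict[str, list[int]] = {group: [] for group in groups}
--
--     for group in groups: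
--         for idx, members in enumerate(letter_groups):
--             if all(nonsignificant[group][member] for member in members):
--                 members.append(group)
--                 assigned[group].append(idx)
--         if not assigned[group]:
--             letter_groups.append([group])
--             assigned[group].append(len(letter_groups) - 1)
--
--     keep = [True] * len(letter_groups)
--     member_sets = [set(members) for members in letter_groups]
--     for i, set_i in enumerate(member_sets):
--         for j, set_j in enumerate(member_sets):
--             if i != j and set_i and set_i.issubset(set_j) and len(set_i) < len(set_j):
--                 keep[i] = False
--
--     remap: dict[int, int] = {}
--     next_index = 0
--     for old_index, keep_flag in enumerate(keep):
--         if keep_flag: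
--             remap[old_index] = next_index
--             next_index += 1
--
--     final = {}
--     for group in groups:
--         letters = [excel_letter(remap[idx]) for idx in assigned[group] if idx in remap]
--         final[group] = "".join(letters) if letters else "a"
--     return final
-- ===== SOURCE B (Python) =====
-- def excel_letter(index: int) -> str:
--     result = ""
--     current = index
--     while True:
--         current, rem = divmod(current, 26)
--         result = chr(97 + rem) + result
--         if current == 0:
--             return result
--         current -= 1
--
-- def compact_letter_display(
--     groups: list[str], nonsignificant: dict[str, dict[str, bool]]
-- ) -> dict[str, str]:
--     # Each cluster is determined solely by its founder: it is the greedy clique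
--     # obtained by scanning forward from the founder and admitting every group
--     # compatible with all members admitted so far.  Clusters are therefore
--     # computed independently per founder instead of grown incrementally.
--     def clique(start: int) -> list[str]:
--         members = [groups[start]]
--         for g in groups[start + 1:]:
--             if all(nonsignificant[g][m] for m in members):
--                 members.append(g)
--         return members
--
--     # A group founds a new cluster exactly when no earlier founder's clique
--     # already contains it.
--     clusters: list[list[str]] = []
--     for pos, g in enumerate(groups):
--         if not any(g in c for c in clusters):
--             clusters.append(clique(pos))
--
--     # Drop clusters that are proper subsets of another cluster.
--     sets = [set(c) for c in clusters]
--     kept = [c for c, s in zip(clusters, sets) if not any(s < t for t in sets)]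
--
--     # Letters read off the kept clusters directly.
--     return {
--         g: "".join(excel_letter(k) for k, c in enumerate(kept) if g in c) or "a"
--         for g in groups
--     }
-- ===== Notes on version B (the rewrite author's own statement) =====
-- stated objective: alternative
-- what changed: B replaces A's incremental mutation of shared cluster state (letter_groups grown per group, `assigned` index dict, remap dict) by a founder-based reformulation: each cluster is computed independently as the greedy forward clique seeded at its founder, a group founds a cluster iff no earlier founder's clique contains it, and letters are read straight off the enumerated kept clusters.
-- outside the precondition, e.g. on compact_letter_display(['a', 'a'], {'a': {'a': True}}): A returns {'a': 'aa'}, B returns {'a': 'a'}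
import Mathlib
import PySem

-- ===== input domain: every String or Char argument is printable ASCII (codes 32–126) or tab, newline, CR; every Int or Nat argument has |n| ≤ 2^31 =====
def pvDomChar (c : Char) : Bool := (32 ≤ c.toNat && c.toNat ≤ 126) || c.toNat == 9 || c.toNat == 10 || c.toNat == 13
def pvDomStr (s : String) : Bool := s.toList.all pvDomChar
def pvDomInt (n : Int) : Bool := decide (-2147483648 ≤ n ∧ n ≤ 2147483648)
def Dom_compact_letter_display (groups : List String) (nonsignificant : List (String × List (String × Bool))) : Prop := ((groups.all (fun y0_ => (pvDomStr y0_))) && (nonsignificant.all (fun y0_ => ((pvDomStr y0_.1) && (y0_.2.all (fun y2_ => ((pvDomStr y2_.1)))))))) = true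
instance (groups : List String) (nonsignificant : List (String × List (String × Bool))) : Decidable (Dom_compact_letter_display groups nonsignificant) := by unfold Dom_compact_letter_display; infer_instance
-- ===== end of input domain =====

-- B replaces A's incremental mutation of shared cluster state (`letter_groups`
-- grown group by group, the `assigned` index dict, the remap dict) by a
-- founder-based reformulation: each cluster is the greedy forward clique seeded
-- at its founder, computed independently; a group founds a cluster iff no
-- earlier founder's clique contains it; letters are read off the enumerated
-- kept clusters.  Objective: alternative.  Equivalence is on the RETURN value.

-- shared helpers: the module helper `excel_letter` (both sources use it verbatim)
-- and the dict lookup `nonsignificant[group][member]` (assoc list, first match).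
def pvExcelAux (current : Nat) (result : List Char) : List Char :=
  let q := current / 26
  let r := current % 26
  let result' := Char.ofNat (97 + r) :: result
  if q = 0 then result' else pvExcelAux (q - 1) result'
termination_by current
decreasing_by
  have h1 : q ≤ current := Nat.div_le_self current 26
  omega

def excel_letter (index : Nat) : String := String.ofList (pvExcelAux index [])

def pvNsLookup (ns : List (String × List (String × Bool))) (g m : String) : Bool :=
  (List.lookup m ((List.lookup g ns).getD [])).getD false

def pvNsAll (ns : List (String × List (String × Bool))) (g : String) (members : List String) : Bool :=
  members.all (pvNsLookup ns g)

-- ===== PORT A =====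
-- inner `for idx, members in enumerate(letter_groups)` loop: accumulates the updated
-- clusters and the list of joined indices (`assigned[group].append(idx)`).
def pvInnerA (ns : List (String × List (String × Bool))) (g : String)
    (lg : List (List String)) : List (List String) × List Nat :=
  (lg.zipIdx).foldl (fun acc p =>
    if pvNsAll ns g p.1 then (acc.1 ++ [p.1 ++ [g]], acc.2 ++ [p.2])
    else (acc.1 ++ [p.1], acc.2)) ([], [])

-- body of `for group in groups:` (letter_groups, assigned) is the mutable state
def pvStepA (ns : List (String × List (String × Bool)))
    (st : List (List String) × PySem.Dict String (List Nat)) (g : String) :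
    List (List String) × PySem.Dict String (List Nat) :=
  let r := pvInnerA ns g st.1
  let cur := (st.2.getD g []) ++ r.2
  if cur.isEmpty then (r.1 ++ [[g]], st.2.insert g [r.1.length])
  else (r.1, st.2.insert g cur)

def pvPhase1A (ns : List (String × List (String × Bool))) (groups : List String) :
    List (List String) × PySem.Dict String (List Nat) :=
  groups.foldl (pvStepA ns)
    ([], groups.foldl (fun d g => d.insert g ([] : List Nat)) PySem.Dict.empty)

-- `keep` flags: start all True, nested loops set keep[i] = False
def pvKeepA (msets : List (PySem.Set String)) : List Bool :=
  (msets.zipIdx).foldl (fun keep pi =>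
    (msets.zipIdx).foldl (fun keep pj =>
      if decide (pi.2 ≠ pj.2) && !pi.1.isEmpty && PySem.Set.issubset pi.1 pj.1 &&
         decide (PySem.Set.len pi.1 < PySem.Set.len pj.1)
      then keep.set pi.2 false else keep) keep)
    (List.replicate msets.length true)

-- `remap` dict with running next_index
def pvRemapA (keep : List Bool) : PySem.Dict Nat Nat :=
  ((keep.zipIdx).foldl (fun (st : PySem.Dict Nat Nat × Nat) p =>
      if p.1 then (st.1.insert p.2 st.2, st.2 + 1) else st)
    (PySem.Dict.empty, 0)).1

def compact_letter_display (groups : List String) (nonsignificant : List (String × List (String × Bool))) : List (String × String) :=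
  let p1 := pvPhase1A nonsignificant groups
  let lg := p1.1
  let asg := p1.2
  let msets := lg.map PySem.Set.ofList
  let keep := pvKeepA msets
  let remap := pvRemapA keep
  (groups.foldl (fun (fin : PySem.Dict String String) g =>
      let letters := (asg.getD g []).filterMap (fun idx => (remap.get? idx).map excel_letter)
      fin.insert g (if letters.isEmpty then "a" else PySem.Str.join "" letters))
    PySem.Dict.empty).items

-- ===== PORT B =====
-- B's local helper `clique`: greedy forward scan extending `members`
def pvClique (ns : List (String × List (String × Bool))) (members rest : List String) : List String :=
  rest.foldl (fun ms g => if pvNsAll ns g ms then ms ++ [g] else ms) members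

-- `for pos, g in enumerate(groups): if not any(g in c for c in clusters): append clique(pos)`
def pvClustersB (ns : List (String × List (String × Bool))) (groups : List String) : List (List String) :=
  (groups.zipIdx).foldl (fun cs p =>
    if !(cs.any (fun c => c.contains p.1)) then cs ++ [pvClique ns [p.1] (groups.drop (p.2 + 1))]
    else cs) []

-- `"".join(...) or "a"`: the join is falsy exactly when the letter list is empty
-- (each excel_letter is a nonempty string), so `or "a"` is the isEmpty test below.
def compact_letter_display_alt (groups : List String) (nonsignificant : List (String × List (String × Bool))) : List (String × String) :=
  let clusters := pvClustersB nonsignificant groups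
  let sets := clusters.map PySem.Set.ofList
  -- `kept = [c for c, s in zip(clusters, sets) if not any(s < t for t in sets)]`;
  -- Python's proper-subset `s < t` is extensional: issubset s t && !issubset t s.
  let kept := (clusters.zip sets).filterMap (fun p =>
      if sets.any (fun t => PySem.Set.issubset p.2 t && !PySem.Set.issubset t p.2) then none
      else some p.1)
  (groups.foldl (fun (fin : PySem.Dict String String) g =>
      let ls := (kept.zipIdx).filterMap (fun p =>
        if p.1.contains g then some (excel_letter p.2) else none)
      fin.insert g (if ls.isEmpty then "a" else PySem.Str.join "" ls))
    PySem.Dict.empty).items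

-- ===== PRECONDITION & SPEC =====
-- Pre_ excludes (i) inputs on which `nonsignificant[group][member]` may raise
-- KeyError: A only ever looks up pairs (later group, earlier group), so those pairs
-- must be present — a safe closed-form under-approximation, since the short-circuit
-- in `all(...)` can let A return even with some such pair missing (A = B there), and
-- (ii) duplicate group names, on which A's behaviour is an accidental artefact of
-- keying per-group state by name in a dict (the duplicate shares one `assigned`
-- entry, so its singleton cluster is silently skipped and letters are repeated).
def Pre_compact_letter_display (groups : List String) (nonsignificant : List (String × List (String × Bool))) : Prop :=
  groups.Nodup ∧
  ∀ j, j < groups.length → ∀ i, i < j →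
    (List.lookup (groups.getD i "") ((List.lookup (groups.getD j "") nonsignificant).getD [])).isSome = true

instance (groups : List String) (nonsignificant : List (String × List (String × Bool))) : Decidable (Pre_compact_letter_display groups nonsignificant) := by
  unfold Pre_compact_letter_display; infer_instance

def pvWitness_compact_letter_display : List String × (List (String × List (String × Bool))) :=
  (["x", "y"], [("x", [("x", true), ("y", false)]), ("y", [("x", false), ("y", true)])])

def Spec_compact_letter_display (groups : List String) (nonsignificant : List (String × List (String × Bool))) (out : List (String × String)) : Prop := out = compact_letter_display_alt groups nonsignificant
instance (groups : List String) (nonsignificant : List (String × List (String × Bool))) (out : List (String × String)) : Decidable (Spec_compact_letter_display groups nonsignificant out) := by unfold Spec_compact_letter_display; infer_instance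

-- ===== CLAIM (what is proved, stated in full; the proofs are below) =====
def Claim_equal_compact_letter_display : Prop := ∀ (groups : List String) (nonsignificant : List (String × List (String × Bool))), Dom_compact_letter_display groups nonsignificant → Pre_compact_letter_display groups nonsignificant → Spec_compact_letter_display groups nonsignificant (compact_letter_display groups nonsignificant)

-- ===== LEMMAS AND PROOFS =====

-- proof-only helpers: the cluster update a single group performs, the ordered list
-- of cluster indices whose members all pass the test / that contain a given group,
-- and the reduced (assigned-free) form of A's per-group step.
def pvUpd (ns : List (String × List (String × Bool))) (g : String) (ms : List String) : List String :=
  if pvNsAll ns g ms then ms ++ [g] else ms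

def pvJoinIdx (ns : List (String × List (String × Bool))) (g : String)
    (lg : List (List String)) (k : Nat) : List Nat :=
  (lg.zipIdx k).filterMap (fun p => if pvNsAll ns g p.1 then some p.2 else none)

def pvIdxList (g : String) (lg : List (List String)) (k : Nat) : List Nat :=
  (lg.zipIdx k).filterMap (fun p => if p.1.contains g then some p.2 else none)

def pvInnerR (ns : List (String × List (String × Bool))) (g : String)
    (lg : List (List String)) : List (List String) × Bool :=
  lg.foldl (fun acc ms =>
    if pvNsAll ns g ms then (acc.1 ++ [ms ++ [g]], true)
    else (acc.1 ++ [ms], acc.2)) ([], false)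

def pvStepR (ns : List (String × List (String × Bool))) (lg : List (List String))
    (g : String) : List (List String) :=
  let r := pvInnerR ns g lg
  if r.2 then r.1 else r.1 ++ [[g]]

theorem pv_fst_mem_of_mem_zipIdx {α : Type} {p : α × Nat} {xs : List α} {k : Nat}
    (h : p ∈ xs.zipIdx k) : p.1 ∈ xs := by
  obtain ⟨x, i⟩ := p
  obtain ⟨h1, h2, h3⟩ := List.mem_zipIdx h
  rw [h3]; exact List.getElem_mem _

theorem pv_zipIdx_succ {α : Type} (l : List α) (k : Nat) :
    l.zipIdx (k + 1) = (l.zipIdx k).map (fun p => (p.1, p.2 + 1)) := by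
  induction l generalizing k with
  | nil => simp
  | cons x xs ih => simp [List.zipIdx_cons, ih]

theorem pvInnerA_fold (ns : List (String × List (String × Bool))) (g : String)
    (lg : List (List String)) : ∀ (k : Nat) (accL : List (List String)) (accI : List Nat),
    (lg.zipIdx k).foldl (fun acc p =>
        if pvNsAll ns g p.1 then (acc.1 ++ [p.1 ++ [g]], acc.2 ++ [p.2])
        else (acc.1 ++ [p.1], acc.2)) (accL, accI)
      = (accL ++ lg.map (pvUpd ns g), accI ++ pvJoinIdx ns g lg k) := by
  induction lg with
  | nil => simp [pvJoinIdx]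
  | cons ms rest ih =>
    intro k accL accI
    simp only [List.zipIdx_cons, List.foldl_cons, pvJoinIdx, List.filterMap_cons, List.map_cons]
    by_cases h : pvNsAll ns g ms <;>
      simp only [h, Bool.false_eq_true, reduceIte] <;>
      rw [ih] <;> simp [pvJoinIdx, pvUpd, h]

theorem pvInnerA_eq (ns : List (String × List (String × Bool))) (g : String)
    (lg : List (List String)) :
    pvInnerA ns g lg = (lg.map (pvUpd ns g), pvJoinIdx ns g lg 0) := by
  simpa [pvInnerA] using pvInnerA_fold ns g lg 0 [] []

theorem pvInnerR_fold (ns : List (String × List (String × Bool))) (g : String)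
    (lg : List (List String)) : ∀ (accL : List (List String)) (b : Bool),
    lg.foldl (fun acc ms =>
        if pvNsAll ns g ms then (acc.1 ++ [ms ++ [g]], true)
        else (acc.1 ++ [ms], acc.2)) (accL, b)
      = (accL ++ lg.map (pvUpd ns g), b || lg.any (pvNsAll ns g)) := by
  induction lg with
  | nil => simp
  | cons ms rest ih =>
    intro accL b
    simp only [List.foldl_cons, List.map_cons, List.any_cons]
    by_cases h : pvNsAll ns g ms <;>
      simp only [h, reduceIte] <;> rw [ih] <;> simp [pvUpd, h]

theorem pvInnerR_eq (ns : List (String × List (String × Bool))) (g : String)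
    (lg : List (List String)) :
    pvInnerR ns g lg = (lg.map (pvUpd ns g), lg.any (pvNsAll ns g)) := by
  simpa [pvInnerR] using pvInnerR_fold ns g lg [] false

theorem pvJoinIdx_eq_nil_iff (ns : List (String × List (String × Bool))) (g : String)
    (lg : List (List String)) (k : Nat) :
    pvJoinIdx ns g lg k = [] ↔ lg.any (pvNsAll ns g) = false := by
  constructor
  · intro h
    rw [List.any_eq_false]
    intro ms hms
    by_contra hc
    rw [pvJoinIdx, List.filterMap_eq_nil_iff] at h
    obtain ⟨i, hi, rfl⟩ := List.mem_iff_getElem.mp hms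
    have hmem : (lg[i], k + i) ∈ lg.zipIdx k := by
      rw [List.mem_iff_getElem?]
      refine ⟨i, ?_⟩
      rw [List.getElem?_zipIdx]
      simp [hi]
    have h2 := h _ hmem
    simp [hc] at h2
  · intro h
    rw [List.any_eq_false] at h
    rw [pvJoinIdx, List.filterMap_eq_nil_iff]
    intro p hp
    have := h p.1 (pv_fst_mem_of_mem_zipIdx hp)
    simp [this]

theorem pvIdxList_append (h : String) (lg1 lg2 : List (List String)) (k : Nat) :
    pvIdxList h (lg1 ++ lg2) k = pvIdxList h lg1 k ++ pvIdxList h lg2 (k + lg1.length) := by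
  simp [pvIdxList, List.zipIdx_append, List.filterMap_append]

theorem pvIdxList_nil_of (g : String) (lg : List (List String)) (k : Nat)
    (hg : ∀ ms ∈ lg, g ∉ ms) : pvIdxList g lg k = [] := by
  rw [pvIdxList, List.filterMap_eq_nil_iff]
  intro p hp
  have h2 := hg p.1 (pv_fst_mem_of_mem_zipIdx hp)
  simp [h2]

theorem pvIdxList_map_ne (h g : String) (hne : h ≠ g)
    (ns : List (String × List (String × Bool))) (lg : List (List String)) (k : Nat) :
    pvIdxList h (lg.map (pvUpd ns g)) k = pvIdxList h lg k := by
  simp only [pvIdxList, List.zipIdx_map, List.filterMap_map]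
  apply List.filterMap_congr
  intro p _
  simp only [Function.comp, Prod.map, pvUpd]
  split
  · simp [hne]
  · rfl

theorem pvIdxList_map_self (ns : List (String × List (String × Bool))) (g : String)
    (lg : List (List String)) (k : Nat) (hg : ∀ ms ∈ lg, g ∉ ms) :
    pvIdxList g (lg.map (pvUpd ns g)) k = pvJoinIdx ns g lg k := by
  simp only [pvIdxList, pvJoinIdx, List.zipIdx_map, List.filterMap_map]
  apply List.filterMap_congr
  intro p hp
  have hpg := hg p.1 (pv_fst_mem_of_mem_zipIdx hp)
  simp only [Function.comp, Prod.map, pvUpd]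
  split
  · simp
  · simp [hpg]

theorem pvIdxList_shift (g : String) (lg : List (List String)) (k : Nat) :
    pvIdxList g lg (k + 1) = (pvIdxList g lg k).map (· + 1) := by
  simp only [pvIdxList, pv_zipIdx_succ, List.filterMap_map, List.map_filterMap]
  apply List.filterMap_congr
  intro p _
  simp only [Function.comp]
  split <;> simp

theorem pvIdxList_cons (g : String) (ms : List String) (rest : List (List String)) (k : Nat) :
    pvIdxList g (ms :: rest) k
      = (if ms.contains g then [k] else []) ++ pvIdxList g rest (k + 1) := by
  simp only [pvIdxList, List.zipIdx_cons, List.filterMap_cons]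
  split <;> simp_all

theorem pvStepA_char (ns : List (String × List (String × Bool))) (g : String)
    (lg : List (List String)) (asg : PySem.Dict String (List Nat))
    (hg : ∀ ms ∈ lg, g ∉ ms)
    (hasg : ∀ h, asg.getD h [] = pvIdxList h lg 0) :
    (pvStepA ns (lg, asg) g).1 = pvStepR ns lg g ∧
    (∀ h, (pvStepA ns (lg, asg) g).2.getD h [] = pvIdxList h (pvStepR ns lg g) 0) := by
  have hgJ : asg.getD g [] = [] := by rw [hasg g]; exact pvIdxList_nil_of g lg 0 hg
  simp only [pvStepA, pvInnerA_eq, hgJ, List.nil_append]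
  by_cases hany : lg.any (pvNsAll ns g) = true
  · have hJ : ¬ pvJoinIdx ns g lg 0 = [] := by
      intro h0; rw [pvJoinIdx_eq_nil_iff] at h0; simp [h0] at hany
    rw [if_neg (by simpa [List.isEmpty_iff] using hJ)]
    refine ⟨?_, ?_⟩
    · simp only [pvStepR, pvInnerR_eq, hany, if_true]
    · intro h
      rw [PySem.Dict.getD_insert]
      simp only [pvStepR, pvInnerR_eq, hany, if_true]
      by_cases hh : h = g
      · subst hh; rw [if_pos rfl, pvIdxList_map_self ns h lg 0 hg]
      · rw [if_neg hh, pvIdxList_map_ne h g hh ns lg 0, hasg h]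
  · have hJ : pvJoinIdx ns g lg 0 = [] := (pvJoinIdx_eq_nil_iff ns g lg 0).mpr (by simpa using hany)
    rw [if_pos (by simp [hJ])]
    refine ⟨?_, ?_⟩
    · simp only [pvStepR, pvInnerR_eq, hany, Bool.false_eq_true, reduceIte]
    · intro h
      rw [PySem.Dict.getD_insert]
      simp only [pvStepR, pvInnerR_eq, hany, Bool.false_eq_true, reduceIte]
      rw [pvIdxList_append]
      by_cases hh : h = g
      · subst hh
        rw [if_pos rfl, pvIdxList_map_self ns h lg 0 hg, hJ, List.nil_append]
        simp [pvIdxList, List.zipIdx_cons]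
      · rw [if_neg hh, pvIdxList_map_ne h g hh ns lg 0, hasg h]
        have : pvIdxList h [[g]] (0 + (lg.map (pvUpd ns g)).length) = [] := by
          simp [pvIdxList, List.zipIdx_cons, hh]
        rw [this, List.append_nil]

theorem pvStepR_mem (ns : List (String × List (String × Bool))) (g : String)
    (lg : List (List String)) :
    ∀ ms ∈ pvStepR ns lg g, ∀ m ∈ ms, (∃ ms' ∈ lg, m ∈ ms') ∨ m = g := by
  intro ms hms m hm
  simp only [pvStepR, pvInnerR_eq] at hms
  have hcases : (∃ a ∈ lg, pvUpd ns g a = ms) ∨ ms = [g] := by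
    by_cases hany : lg.any (pvNsAll ns g) = true <;> simp [hany] at hms <;> first | exact Or.inl hms | exact hms
  rcases hcases with ⟨ms0, hms0, rfl⟩ | rfl
  · simp only [pvUpd] at hm
    split at hm
    · rcases List.mem_append.mp hm with h | h
      · exact Or.inl ⟨ms0, hms0, h⟩
      · simp at h; exact Or.inr h
    · exact Or.inl ⟨ms0, hms0, hm⟩
  · simp at hm; exact Or.inr hm

theorem pvStepR_nodup (ns : List (String × List (String × Bool))) (g : String)
    (lg : List (List String)) (hg : ∀ ms ∈ lg, g ∉ ms)
    (hnd : ∀ ms ∈ lg, ms.Nodup) : ∀ ms ∈ pvStepR ns lg g, ms.Nodup := by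
  intro ms hms
  simp only [pvStepR, pvInnerR_eq] at hms
  have hcases : (∃ a ∈ lg, pvUpd ns g a = ms) ∨ ms = [g] := by
    by_cases hany : lg.any (pvNsAll ns g) = true <;> simp [hany] at hms <;> first | exact Or.inl hms | exact hms
  rcases hcases with ⟨ms0, hms0, rfl⟩ | rfl
  · simp only [pvUpd]
    split
    · exact List.Nodup.append (hnd ms0 hms0) (List.nodup_singleton g)
        (by simp [List.disjoint_singleton]; exact hg ms0 hms0)
    · exact hnd ms0 hms0
  · exact List.nodup_singleton g

theorem pvPhase1_fold (ns : List (String × List (String × Bool))) :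
    ∀ (gs : List String) (processed : List String) (lg : List (List String))
      (asg : PySem.Dict String (List Nat)),
    gs.Nodup → (∀ g ∈ gs, g ∉ processed) →
    (∀ ms ∈ lg, ∀ m ∈ ms, m ∈ processed) → (∀ ms ∈ lg, ms.Nodup) →
    (∀ h, asg.getD h [] = pvIdxList h lg 0) →
    (gs.foldl (pvStepA ns) (lg, asg)).1 = gs.foldl (pvStepR ns) lg ∧
    (∀ ms ∈ gs.foldl (pvStepR ns) lg, ∀ m ∈ ms, m ∈ processed ∨ m ∈ gs) ∧
    (∀ ms ∈ gs.foldl (pvStepR ns) lg, ms.Nodup) ∧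
    (∀ h, (gs.foldl (pvStepA ns) (lg, asg)).2.getD h [] =
      pvIdxList h (gs.foldl (pvStepR ns) lg) 0) := by
  intro gs
  induction gs with
  | nil =>
    intro processed lg asg _ _ h1 h2 h3
    exact ⟨rfl, fun ms hms m hm => Or.inl (h1 ms hms m hm), h2, h3⟩
  | cons g gs ih =>
    intro processed lg asg hnd hfresh h1 h2 h3
    have hg : ∀ ms ∈ lg, g ∉ ms := fun ms hms hmem =>
      hfresh g (by simp) (h1 ms hms g hmem)
    obtain ⟨hc1, hc2⟩ := pvStepA_char ns g lg asg hg h3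
    simp only [List.foldl_cons]
    have hpair : pvStepA ns (lg, asg) g = (pvStepR ns lg g, (pvStepA ns (lg, asg) g).2) := by
      rw [← hc1]
    rw [hpair]
    have hmem' : ∀ ms ∈ pvStepR ns lg g, ∀ m ∈ ms, m ∈ processed ++ [g] := by
      intro ms hms m hm
      rcases pvStepR_mem ns g lg ms hms m hm with ⟨ms', hms', hmm⟩ | rfl
      · simp [h1 ms' hms' m hmm]
      · simp
    have hnd' : ∀ ms ∈ pvStepR ns lg g, ms.Nodup := pvStepR_nodup ns g lg hg h2
    have hfresh' : ∀ g' ∈ gs, g' ∉ processed ++ [g] := by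
      intro g' hg'
      simp only [List.mem_append, List.mem_singleton]
      rintro (h | rfl)
      · exact hfresh g' (by simp [hg']) h
      · exact (List.nodup_cons.mp hnd).1 hg'
    obtain ⟨r1, r2, r3, r4⟩ := ih (processed ++ [g]) (pvStepR ns lg g)
      (pvStepA ns (lg, asg) g).2 (List.nodup_cons.mp hnd).2 hfresh' hmem' hnd' hc2
    refine ⟨r1, ?_, r3, r4⟩
    intro ms hms m hm
    rcases r2 ms hms m hm with h | h
    · rcases List.mem_append.mp h with h | h
      · exact Or.inl h
      · simp at h; simp [h]
    · simp [h]

theorem pv_foldl_insert_nil_getD {ν : Type} (gs : List String)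
    (d : PySem.Dict String (List ν)) (hd : ∀ h, d.getD h [] = []) :
    ∀ h, (gs.foldl (fun d g => d.insert g ([] : List ν)) d).getD h [] = [] := by
  induction gs generalizing d with
  | nil => exact hd
  | cons g gs ih =>
    intro h
    simp only [List.foldl_cons]
    exact ih (d.insert g []) (fun h' => by
      rw [PySem.Dict.getD_insert]; split <;> simp [hd h']) h

-- ===== the founder-based characterisation of the cluster-building phase =====

-- truncated/full greedy cliques of a founder pair (name, position)
def pvTrunc (ns : List (String × List (String × Bool))) (groups : List String)
    (p : String × Nat) (k : Nat) : List String :=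
  pvClique ns [p.1] ((groups.take k).drop (p.2 + 1))

def pvFull (ns : List (String × List (String × Bool))) (groups : List String)
    (p : String × Nat) : List String :=
  pvClique ns [p.1] (groups.drop (p.2 + 1))

theorem pvClique_append_singleton (ns : List (String × List (String × Bool)))
    (ms l : List String) (g : String) :
    pvClique ns ms (l ++ [g]) = pvUpd ns g (pvClique ns ms l) := by
  simp [pvClique, pvUpd, List.foldl_append]

theorem pvClique_append (ns : List (String × List (String × Bool)))
    (ms l1 l2 : List String) :
    pvClique ns ms (l1 ++ l2) = pvClique ns (pvClique ns ms l1) l2 := by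
  simp [pvClique, List.foldl_append]

theorem pvClique_prefix (ns : List (String × List (String × Bool))) :
    ∀ (l ms : List String), ms <+: pvClique ns ms l := by
  intro l
  induction l with
  | nil => intro ms; simp [pvClique]
  | cons g rest ih =>
    intro ms
    simp only [pvClique, List.foldl_cons]
    by_cases h : pvNsAll ns g ms
    · simp only [h, reduceIte]
      exact List.IsPrefix.trans (List.prefix_append ms [g]) (ih (ms ++ [g]))
    · simp only [h, Bool.false_eq_true, reduceIte]
      exact ih ms

theorem pvClique_mem (ns : List (String × List (String × Bool))) :
    ∀ (l ms : List String), ∀ y ∈ pvClique ns ms l, y ∈ ms ∨ y ∈ l := by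
  intro l
  induction l with
  | nil => intro ms y hy; exact Or.inl (by simpa [pvClique] using hy)
  | cons g rest ih =>
    intro ms y hy
    simp only [pvClique, List.foldl_cons] at hy
    by_cases h : pvNsAll ns g ms
    · simp only [h, reduceIte] at hy
      rcases ih (ms ++ [g]) y hy with h2 | h2
      · rcases List.mem_append.mp h2 with h3 | h3
        · exact Or.inl h3
        · simp at h3; simp [h3]
      · simp [h2]
    · simp only [h, Bool.false_eq_true, reduceIte] at hy
      rcases ih ms y hy with h2 | h2
      · exact Or.inl h2
      · simp [h2]

theorem pvClique_ne_nil (ns : List (String × List (String × Bool)))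
    (x : String) (l : List String) : pvClique ns [x] l ≠ [] := by
  intro h
  have := pvClique_prefix ns l [x]
  rw [h] at this
  exact absurd (List.prefix_nil.mp this) (by simp)

-- facts about the position k being processed
theorem pv_drop_facts (groups : List String) (k : Nat) (g : String) (rest : List String)
    (h : groups.drop k = g :: rest) :
    groups[k]? = some g ∧ groups.drop (k + 1) = rest ∧ k < groups.length := by
  have h1 : groups[k]? = some g := by
    have h0 : (groups.drop k)[0]? = groups[k + 0]? := List.getElem?_drop
    rw [h] at h0
    simpa using h0.symm
  have h2 : groups.drop (k + 1) = rest := by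
    rw [← List.drop_drop, h]; rfl
  exact ⟨h1, h2, List.getElem?_eq_some_iff.mp h1 |>.1⟩

theorem pv_take_succ_eq (groups : List String) (k : Nat) (g : String)
    (h : groups[k]? = some g) : groups.take (k + 1) = groups.take k ++ [g] := by
  rw [List.take_add_one, h]; rfl

theorem pv_nodup_not_mem (groups : List String) (k : Nat) (g : String) (rest : List String)
    (hnd : groups.Nodup) (h : groups.drop k = g :: rest) :
    g ∉ groups.take k ∧ g ∉ rest := by
  have hsplit : groups.take k ++ (g :: rest) = groups := by
    rw [← h]; exact List.take_append_drop k groups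
  rw [← hsplit] at hnd
  have h1 := List.Nodup.of_append_right hnd
  have h2 := (List.nodup_append.mp hnd).2.2
  constructor
  · intro hmem
    exact (h2 g hmem g (by simp)) rfl
  · exact (List.nodup_cons.mp h1).1

theorem pvTrunc_succ (ns : List (String × List (String × Bool))) (groups : List String)
    (p : String × Nat) (k : Nat) (g : String) (hp : p.2 < k) (hk : k < groups.length)
    (hg : groups[k]? = some g) :
    pvTrunc ns groups p (k + 1) = pvUpd ns g (pvTrunc ns groups p k) := by
  unfold pvTrunc
  rw [pv_take_succ_eq groups k g hg,
    List.drop_append_of_le_length (by simp [List.length_take]; omega),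
    pvClique_append_singleton]

theorem pvTrunc_elem_mem_take (ns : List (String × List (String × Bool)))
    (groups : List String) (p : String × Nat) (k : Nat) (hp : p.2 < k)
    (hg : groups[p.2]? = some p.1) :
    ∀ y ∈ pvTrunc ns groups p k, y ∈ groups.take k := by
  intro y hy
  rcases pvClique_mem ns _ _ y hy with h | h
  · simp at h
    subst h
    exact List.mem_of_getElem? (by rw [List.getElem?_take_of_lt hp]; exact hg)
  · exact List.mem_of_mem_drop h

theorem pvFull_contains_iff (ns : List (String × List (String × Bool)))
    (groups : List String) (p : String × Nat) (k : Nat) (g : String) (rest : List String)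
    (hnd : groups.Nodup) (hdrop : groups.drop k = g :: rest)
    (hp : p.2 < k) (hg : groups[p.2]? = some p.1) :
    (pvFull ns groups p).contains g = pvNsAll ns g (pvTrunc ns groups p k) := by
  obtain ⟨hgk, hdrop1, hklen⟩ := pv_drop_facts groups k g rest hdrop
  obtain ⟨hgtake, hgrest⟩ := pv_nodup_not_mem groups k g rest hnd hdrop
  have hsplit : groups.drop (p.2 + 1)
      = (groups.take (k + 1)).drop (p.2 + 1) ++ groups.drop (k + 1) := by
    conv_lhs => rw [← List.take_append_drop (k + 1) groups]
    rw [List.drop_append_of_le_length (by simp [List.length_take]; omega)]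
  have hfull : pvFull ns groups p = pvClique ns (pvTrunc ns groups p (k + 1)) rest := by
    rw [pvFull, hsplit, hdrop1, pvClique_append]; rfl
  have hsucc := pvTrunc_succ ns groups p k g hp hklen hgk
  have hgnott : g ∉ pvTrunc ns groups p k := fun hmem =>
    hgtake (pvTrunc_elem_mem_take ns groups p k hp hg g hmem)
  cases h : pvNsAll ns g (pvTrunc ns groups p k) with
  | true =>
    have hgmem : g ∈ pvFull ns groups p := by
      rw [hfull]
      refine List.IsPrefix.mem ?_ (pvClique_prefix ns rest (pvTrunc ns groups p (k + 1)))
      rw [hsucc]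
      simp [pvUpd, h]
    simp [hgmem]
  | false =>
    have hgnm : g ∉ pvFull ns groups p := by
      rw [hfull]
      intro hmem
      rcases pvClique_mem ns rest (pvTrunc ns groups p (k + 1)) g hmem with h1 | h1
      · rw [hsucc] at h1
        simp only [pvUpd, h, Bool.false_eq_true, reduceIte] at h1
        exact hgnott h1
      · exact hgrest h1
    simp [hgnm]

-- the B-side fold step, named for the induction
theorem pv_clusters_rec (ns : List (String × List (String × Bool))) (groups : List String)
    (hnd : groups.Nodup) :
    ∀ (suf : List String) (k : Nat) (F : List (String × Nat)),
    groups.drop k = suf →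
    (∀ p ∈ F, p.2 < k ∧ groups[p.2]? = some p.1) →
    ∃ F' : List (String × Nat), (∀ p ∈ F', p.2 < k + suf.length ∧ groups[p.2]? = some p.1) ∧
      suf.foldl (pvStepR ns) (F.map (fun p => pvTrunc ns groups p k))
        = F'.map (fun p => pvTrunc ns groups p (k + suf.length)) ∧
      (suf.zipIdx k).foldl (fun (cs : List (List String)) (p : String × Nat) =>
          if !(cs.any (fun c => c.contains p.1)) then cs ++ [pvClique ns [p.1] (groups.drop (p.2 + 1))]
          else cs) (F.map (pvFull ns groups))
        = F'.map (pvFull ns groups) := by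
  intro suf
  induction suf with
  | nil =>
    intro k F _ hF
    exact ⟨F, fun p hp => by simpa using hF p hp, by simp, by simp⟩
  | cons g rest ih =>
    intro k F hdrop hF
    obtain ⟨hgk, hdrop1, hklen⟩ := pv_drop_facts groups k g rest hdrop
    have hmapsucc : (F.map (fun p => pvTrunc ns groups p k)).map (pvUpd ns g)
        = F.map (fun p => pvTrunc ns groups p (k + 1)) := by
      rw [List.map_map]
      apply List.map_congr_left
      intro p hp
      exact (pvTrunc_succ ns groups p k g (hF p hp).1 hklen hgk).symm
    have hany : (F.map (pvFull ns groups)).any (fun c => c.contains g)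
        = (F.map (fun p => pvTrunc ns groups p k)).any (pvNsAll ns g) := by
      rw [List.any_map, List.any_map]
      apply PySem.List.any_congr_mem
      intro p hp
      exact pvFull_contains_iff ns groups p k g rest hnd hdrop (hF p hp).1 (hF p hp).2
    have hstep : pvStepR ns (F.map (fun p => pvTrunc ns groups p k)) g
        = (if (F.map (pvFull ns groups)).any (fun c => c.contains g)
           then F.map (fun p => pvTrunc ns groups p (k + 1))
           else F.map (fun p => pvTrunc ns groups p (k + 1)) ++ [[g]]) := by
      simp only [pvStepR, pvInnerR_eq, hmapsucc, hany]
    have hlen1 : k + (g :: rest).length = (k + 1) + rest.length := by simp; omega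
    cases hb : (F.map (pvFull ns groups)).any (fun c => c.contains g) with
    | true =>
      obtain ⟨F', hF', e1, e2⟩ := ih (k + 1) F hdrop1
        (fun p hp => ⟨by have := (hF p hp).1; omega, (hF p hp).2⟩)
      refine ⟨F', ?_, ?_, ?_⟩
      · intro p hp
        obtain ⟨hb1, hb2⟩ := hF' p hp
        exact ⟨by rw [hlen1]; exact hb1, hb2⟩
      · rw [List.foldl_cons, hstep, hb, if_pos rfl, e1, hlen1]
      · rw [List.zipIdx_cons, List.foldl_cons]
        simp only [hb, Bool.not_true, Bool.false_eq_true, reduceIte]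
        exact e2
    | false =>
      have hnew : ∀ p ∈ F ++ [(g, k)], p.2 < k + 1 ∧ groups[p.2]? = some p.1 := by
        intro p hp
        rcases List.mem_append.mp hp with h | h
        · exact ⟨by have := (hF p h).1; omega, (hF p h).2⟩
        · simp at h
          subst h
          exact ⟨by omega, hgk⟩
      obtain ⟨F', hF', e1, e2⟩ := ih (k + 1) (F ++ [(g, k)]) hdrop1 hnew
      have htrnew : pvTrunc ns groups (g, k) (k + 1) = [g] := by
        unfold pvTrunc
        have hdt : (groups.take (k + 1)).drop (k + 1) = [] :=
          List.drop_eq_nil_of_le (by simp [List.length_take])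
        simp only [hdt]
        rfl
      refine ⟨F', ?_, ?_, ?_⟩
      · intro p hp
        obtain ⟨hb1, hb2⟩ := hF' p hp
        exact ⟨by rw [hlen1]; exact hb1, hb2⟩
      · rw [List.foldl_cons, hstep, hb]
        simp only [Bool.false_eq_true, reduceIte]
        rw [show F.map (fun p => pvTrunc ns groups p (k + 1)) ++ [[g]]
            = (F ++ [(g, k)]).map (fun p => pvTrunc ns groups p (k + 1)) by
          rw [List.map_append]
          simp [htrnew]]
        rw [e1, hlen1]
      · rw [List.zipIdx_cons, List.foldl_cons]
        simp only [hb, Bool.not_false, if_pos]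
        rw [show F.map (pvFull ns groups) ++ [pvClique ns [g] (groups.drop (k + 1))]
            = (F ++ [(g, k)]).map (pvFull ns groups) by
          rw [List.map_append]; rfl]
        exact e2

theorem pv_clusters_eq (ns : List (String × List (String × Bool))) (groups : List String)
    (hnd : groups.Nodup) :
    groups.foldl (pvStepR ns) [] = pvClustersB ns groups ∧
    ∀ c ∈ pvClustersB ns groups, c ≠ [] := by
  obtain ⟨F', hF', e1, e2⟩ := pv_clusters_rec ns groups hnd groups 0 []
    (by simp) (by simp)
  have htf : F'.map (fun p => pvTrunc ns groups p groups.length)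
      = F'.map (pvFull ns groups) := by
    apply List.map_congr_left
    intro p _
    unfold pvTrunc pvFull
    rw [List.take_length]
  have hB : pvClustersB ns groups = F'.map (pvFull ns groups) := by
    unfold pvClustersB
    simpa using e2
  constructor
  · rw [hB, ← htf]
    simpa using e1
  · intro c hc
    rw [hB] at hc
    obtain ⟨p, _, rfl⟩ := List.mem_map.mp hc
    exact pvClique_ne_nil ns p.1 _

-- ===== keep flags =====
theorem pv_inner_set_fold {σ : Type} (l : List σ) (cond : σ → Bool) (keep : List Bool)
    (i : Nat) :
    l.foldl (fun k pj => if cond pj then k.set i false else k) keep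
      = if l.any cond then keep.set i false else keep := by
  induction l generalizing keep with
  | nil => simp
  | cons a rest ih =>
    simp only [List.foldl_cons, List.any_cons]
    by_cases hc : cond a
    · simp only [hc, reduceIte, Bool.true_or]
      rw [ih]
      split <;> simp [List.set_set]
    · simp [hc, ih]

theorem pv_outer_set_get {σ : Type} (ps : List (σ × Nat)) (c : σ × Nat → Bool) :
    ∀ (init : List Bool) (j : Nat),
    (ps.foldl (fun k pi => if c pi then k.set pi.2 false else k) init)[j]? =
      if ps.any (fun pi => decide (pi.2 = j) && c pi) then init[j]?.map (fun _ => false)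
      else init[j]? := by
  induction ps with
  | nil => intro init j; simp
  | cons p rest ih =>
    intro init j
    simp only [List.foldl_cons, List.any_cons]
    rw [ih]
    by_cases hc : c p
    · by_cases hj : p.2 = j
      · subst hj
        have hset : (init.set p.2 false)[p.2]? = init[p.2]?.map (fun _ => false) := by
          rw [List.getElem?_set]
          cases h : init[p.2]? with
          | none =>
            have : ¬ p.2 < init.length := by
              intro hl; rw [List.getElem?_eq_getElem hl] at h; cases h
            simp [this]
          | some v =>
            have : p.2 < init.length := by
              by_contra hl
              rw [List.getElem?_eq_none (by omega)] at h; cases h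
            simp [this]
        simp only [hc, reduceIte, decide_true, Bool.true_and, Bool.true_or, hset]
        split
        · cases init[p.2]? <;> rfl
        · rfl
      · have hset : (init.set p.2 false)[j]? = init[j]? := by
          rw [List.getElem?_set]; simp [hj]
        have hd : (decide (p.2 = j) : Bool) = false := decide_eq_false hj
        simp only [hc, reduceIte, hset, hd, Bool.false_and, Bool.false_or]
    · have hd : c p = false := by simpa using hc
      simp only [hd, Bool.and_false, Bool.false_or, Bool.false_eq_true, reduceIte]

theorem pv_zipIdx_any_at {σ : Type} (l : List σ) (f : σ × Nat → Bool) :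
    ∀ (k j : Nat),
    (l.zipIdx k).any (fun pi => decide (pi.2 = k + j) && f pi)
      = (l[j]?.map (fun x => f (x, k + j))).getD false := by
  induction l with
  | nil => intro k j; simp
  | cons x xs ih =>
    intro k j
    cases j with
    | zero =>
      simp only [List.zipIdx_cons, List.any_cons, Nat.add_zero, decide_true, Bool.true_and]
      have h2 : (xs.zipIdx (k + 1)).any (fun pi => decide (pi.2 = k) && f pi) = false := by
        rw [List.any_eq_false]
        intro p hp
        obtain ⟨h1', _, _⟩ := List.mem_zipIdx hp
        have : ¬ p.2 = k := by omega
        simp [this]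
      rw [h2]
      cases hf : f (x, k) <;> simp [hf]
    | succ j =>
      simp only [List.zipIdx_cons, List.any_cons]
      have hne : (decide ((x, k).2 = k + (j + 1)) : Bool) = false := by simp
      rw [hne]
      have harith : k + (j + 1) = (k + 1) + j := by omega
      rw [Bool.false_and, Bool.false_or, harith, ih (k + 1) j]
      simp

def pvKeepN (msets : List (PySem.Set String)) : List Bool :=
  (msets.zipIdx).map (fun pi =>
    !((msets.zipIdx).any (fun pj =>
      decide (pi.2 ≠ pj.2) && !pi.1.isEmpty && PySem.Set.issubset pi.1 pj.1 &&
      decide (PySem.Set.len pi.1 < PySem.Set.len pj.1))))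

theorem pvKeep_eq (msets : List (PySem.Set String)) : pvKeepA msets = pvKeepN msets := by
  unfold pvKeepA pvKeepN
  rw [show (fun (keep : List Bool) (pi : PySem.Set String × Nat) =>
      (msets.zipIdx).foldl (fun keep pj =>
        if decide (pi.2 ≠ pj.2) && !pi.1.isEmpty && PySem.Set.issubset pi.1 pj.1 &&
           decide (PySem.Set.len pi.1 < PySem.Set.len pj.1)
        then keep.set pi.2 false else keep) keep)
    = (fun (keep : List Bool) (pi : PySem.Set String × Nat) =>
        if (msets.zipIdx).any (fun pj =>
          decide (pi.2 ≠ pj.2) && !pi.1.isEmpty && PySem.Set.issubset pi.1 pj.1 &&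
          decide (PySem.Set.len pi.1 < PySem.Set.len pj.1))
        then keep.set pi.2 false else keep)
    from funext fun keep => funext fun pi => pv_inner_set_fold _ _ keep pi.2]
  apply List.ext_getElem?
  intro j
  rw [pv_outer_set_get]
  rw [show (fun (pi : PySem.Set String × Nat) => decide (pi.2 = j) &&
        (msets.zipIdx).any (fun pj =>
          decide (pi.2 ≠ pj.2) && !pi.1.isEmpty && PySem.Set.issubset pi.1 pj.1 &&
          decide (PySem.Set.len pi.1 < PySem.Set.len pj.1)))
    = (fun (pi : PySem.Set String × Nat) => decide (pi.2 = 0 + j) &&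
        (msets.zipIdx).any (fun pj =>
          decide (pi.2 ≠ pj.2) && !pi.1.isEmpty && PySem.Set.issubset pi.1 pj.1 &&
          decide (PySem.Set.len pi.1 < PySem.Set.len pj.1)))
    from by rw [Nat.zero_add]]
  rw [pv_zipIdx_any_at]
  rw [List.getElem?_map, List.getElem?_zipIdx]
  cases h : msets[j]? with
  | none =>
    have hj : msets.length ≤ j := List.getElem?_eq_none_iff.mp h
    simp [List.getElem?_replicate]
    omega
  | some x =>
    have hj : j < msets.length := by
      by_contra hl
      rw [List.getElem?_eq_none (by omega)] at h; cases h
    simp only [Option.map_some, Option.getD_some, List.getElem?_replicate, hj, reduceIte,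
      Nat.zero_add]
    cases hc : (msets.zipIdx).any (fun pj =>
        decide ((x, j).2 ≠ pj.2) && !(x, j).1.isEmpty && PySem.Set.issubset (x, j).1 pj.1 &&
        decide (PySem.Set.len (x, j).1 < PySem.Set.len pj.1)) <;>
      simp

-- Python's strict subset `s < t` vs A's `issubset ∧ len <` on nodup element lists
theorem pv_len_lt_iff (s t : PySem.Set String) (hs : s.Nodup) (ht : t.Nodup)
    (hsub : PySem.Set.issubset s t = true) :
    decide (PySem.Set.len s < PySem.Set.len t) = !PySem.Set.issubset t s := by
  have hsub' : ∀ x ∈ s, x ∈ t := (PySem.Set.issubset_iff s t).mp hsub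
  cases hts : PySem.Set.issubset t s with
  | true =>
    have hts' : ∀ x ∈ t, x ∈ s := (PySem.Set.issubset_iff t s).mp hts
    have hfe : s.toFinset = t.toFinset := by
      apply Finset.Subset.antisymm <;> intro x hx <;> simp only [List.mem_toFinset] at *
      · exact hsub' x hx
      · exact hts' x hx
    have h2 := congrArg Finset.card hfe
    rw [List.toFinset_card_of_nodup hs, List.toFinset_card_of_nodup ht] at h2
    simp only [PySem.Set.len, Bool.not_true, decide_eq_false_iff_not]
    omega
  | false =>
    have hfe : s.toFinset ⊂ t.toFinset := by
      constructor
      · intro x hx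
        simp only [List.mem_toFinset] at *
        exact hsub' x hx
      · intro hc
        have : PySem.Set.issubset t s = true := (PySem.Set.issubset_iff t s).mpr
          (fun x hx => by
            have := hc (by simpa using hx)
            simpa using this)
        rw [this] at hts
        cases hts
    have h2 := Finset.card_lt_card hfe
    rw [List.toFinset_card_of_nodup hs, List.toFinset_card_of_nodup ht] at h2
    simp only [PySem.Set.len, Bool.not_false, decide_eq_true_eq]
    omega

theorem pv_any_zipIdx_ne {α : Type} (P : α → Bool) (i : Nat) :
    ∀ (l : List α) (k : Nat), (∀ t, l[i - k]? = some t → k ≤ i → P t = false) →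
    ((l.zipIdx k).any (fun p => decide (i ≠ p.2) && P p.1)) = l.any P := by
  intro l
  induction l with
  | nil => intro k _; simp
  | cons x rest ih =>
    intro k hP
    simp only [List.zipIdx_cons, List.any_cons]
    by_cases hk : k = i
    · subst hk
      have hx : P x = false := hP x (by simp) (le_refl k)
      rw [ih (k + 1) (fun t ht hle => absurd hle (by omega))]
      simp [hx]
    · have hd : (decide (i ≠ (x, k).2) : Bool) = true := by simp; omega
      rw [hd, ih (k + 1) (fun t ht hle => by
        apply hP t ?_ (by omega)
        have hik : i - k = (i - (k + 1)) + 1 := by omega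
        rw [hik]
        simpa using ht)]
      simp

theorem pvKeepA_eq_map (msets : List (PySem.Set String))
    (hne : ∀ s ∈ msets, s ≠ []) (hnd : ∀ s ∈ msets, s.Nodup) :
    pvKeepA msets = msets.map (fun s =>
      !(msets.any (fun t => PySem.Set.issubset s t && !PySem.Set.issubset t s))) := by
  rw [pvKeep_eq]
  unfold pvKeepN
  apply List.ext_getElem?
  intro j
  rw [List.getElem?_map, List.getElem?_map, List.getElem?_zipIdx]
  cases h : msets[j]? with
  | none => rfl
  | some s =>
    simp only [Option.map_some, Option.some.injEq]
    have hsmem : s ∈ msets := List.mem_of_getElem? h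
    have hinner : ((msets.zipIdx).any (fun pj =>
          decide ((s, 0 + j).2 ≠ pj.2) && !(s, 0 + j).1.isEmpty &&
          PySem.Set.issubset (s, 0 + j).1 pj.1 &&
          decide (PySem.Set.len (s, 0 + j).1 < PySem.Set.len pj.1)))
        = msets.any (fun t => !s.isEmpty && (PySem.Set.issubset s t &&
            decide (PySem.Set.len s < PySem.Set.len t))) := by
      rw [show (fun (pj : PySem.Set String × Nat) =>
            decide ((s, 0 + j).2 ≠ pj.2) && !(s, 0 + j).1.isEmpty &&
            PySem.Set.issubset (s, 0 + j).1 pj.1 &&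
            decide (PySem.Set.len (s, 0 + j).1 < PySem.Set.len pj.1))
          = (fun (pj : PySem.Set String × Nat) => decide (j ≠ pj.2) &&
              (!s.isEmpty && (PySem.Set.issubset s pj.1 &&
                decide (PySem.Set.len s < PySem.Set.len pj.1))))
        from by
          funext pj
          simp [Bool.and_assoc]]
      exact pv_any_zipIdx_ne (fun t => !s.isEmpty && (PySem.Set.issubset s t &&
          decide (PySem.Set.len s < PySem.Set.len t))) j msets 0 (fun t ht _ => by
        rw [Nat.sub_zero] at ht
        rw [h] at ht
        cases ht
        simp)
    rw [hinner]
    have hsne : s.isEmpty = false := by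
      obtain ⟨a, as, hs'⟩ := List.exists_cons_of_ne_nil (hne s hsmem)
      rw [hs']
      rfl
    have hpt : ∀ t ∈ msets, (!s.isEmpty && (PySem.Set.issubset s t &&
        decide (PySem.Set.len s < PySem.Set.len t)))
        = (PySem.Set.issubset s t && !PySem.Set.issubset t s) := by
      intro t htm
      cases hst : PySem.Set.issubset s t with
      | true =>
        rw [pv_len_lt_iff s t (hnd s hsmem) (hnd t htm) hst]
        simp [hsne, hst]
      | false =>
        simp [hsne, hst]
    rw [PySem.List.any_congr_mem hpt]

-- ===== letters =====
def pvRemapSpec : List Bool → Nat → Nat → Option Nat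
  | [], _, _ => none
  | b :: _, 0, c => if b then some c else none
  | b :: rest, i + 1, c => pvRemapSpec rest i (if b then c + 1 else c)

theorem pvRemap_fold (ps : List Bool) :
    ∀ (k c : Nat) (d : PySem.Dict Nat Nat), (∀ j, d.get? (k + j) = none) →
    (∀ j, ((ps.zipIdx k).foldl (fun (st : PySem.Dict Nat Nat × Nat) p =>
        if p.1 then (st.1.insert p.2 st.2, st.2 + 1) else st) (d, c)).1.get? (k + j)
      = pvRemapSpec ps j c) ∧
    (∀ j, j < k → ((ps.zipIdx k).foldl (fun (st : PySem.Dict Nat Nat × Nat) p =>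
        if p.1 then (st.1.insert p.2 st.2, st.2 + 1) else st) (d, c)).1.get? j = d.get? j) := by
  induction ps with
  | nil =>
    intro k c d hd
    exact ⟨fun j => by simpa using hd j, fun j _ => rfl⟩
  | cons b rest ih =>
    intro k c d hd
    simp only [List.zipIdx_cons, List.foldl_cons]
    cases b with
    | true =>
      simp only [reduceIte]
      have hd' : ∀ j, (d.insert k c).get? (k + 1 + j) = none := fun j => by
        rw [PySem.Dict.get?_insert_of_ne _ _ (by omega)]
        have := hd (1 + j)
        rwa [show k + (1 + j) = k + 1 + j by omega] at this
      obtain ⟨ih1, ih2⟩ := ih (k + 1) (c + 1) (d.insert k c) hd'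
      constructor
      · intro j
        cases j with
        | zero =>
          simp only [Nat.add_zero]
          rw [ih2 k (by omega), PySem.Dict.get?_insert_self]
          rfl
        | succ j =>
          have := ih1 j
          rwa [show k + 1 + j = k + (j + 1) by omega] at this
      · intro j hj
        rw [ih2 j (by omega), PySem.Dict.get?_insert_of_ne _ _ (by omega)]
    | false =>
      simp only [Bool.false_eq_true, reduceIte]
      have hd' : ∀ j, d.get? (k + 1 + j) = none := fun j => by
        have := hd (1 + j)
        rwa [show k + (1 + j) = k + 1 + j by omega] at this
      obtain ⟨ih1, ih2⟩ := ih (k + 1) c d hd'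
      constructor
      · intro j
        cases j with
        | zero =>
          simp only [Nat.add_zero]
          rw [ih2 k (by omega)]
          have := hd 0
          rw [Nat.add_zero] at this
          rw [this]
          rfl
        | succ j =>
          have := ih1 j
          rwa [show k + 1 + j = k + (j + 1) by omega] at this
      · intro j hj
        exact ih2 j (by omega)

theorem pvRemapA_get (keep : List Bool) (i : Nat) :
    (pvRemapA keep).get? i = pvRemapSpec keep i 0 := by
  have h := pvRemap_fold keep 0 0 PySem.Dict.empty (fun j => PySem.Dict.get?_empty _)
  have h1 := h.1 i
  rwa [Nat.zero_add] at h1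

-- the per-group letter list, walked over (keep flag, cluster) pairs
def pvLettersSpec (g : String) : List (Bool × List String) → Nat → List String
  | [], _ => []
  | p :: rest, c =>
    if p.1 then (if p.2.contains g then [excel_letter c] else []) ++ pvLettersSpec g rest (c + 1)
    else pvLettersSpec g rest c

theorem pvA_letters_eq (g : String) :
    ∀ (lg : List (List String)) (keep : List Bool) (c : Nat), keep.length = lg.length →
    (pvIdxList g lg 0).filterMap (fun i => (pvRemapSpec keep i c).map excel_letter)
      = pvLettersSpec g (keep.zip lg) c := by
  intro lg
  induction lg with
  | nil =>
    intro keep c h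
    have hk : keep = [] := by simpa using h
    subst hk
    simp [pvIdxList, pvLettersSpec]
  | cons ms rest ih =>
    intro keep c hlen
    cases keep with
    | nil => simp at hlen
    | cons b keep' =>
      have hlen' : keep'.length = rest.length := by simpa using hlen
      rw [pvIdxList_cons]
      have hs := pvIdxList_shift g rest 0
      rw [Nat.zero_add] at hs
      rw [hs, List.filterMap_append, List.filterMap_map]
      have htail : (List.filterMap ((fun i => (pvRemapSpec (b :: keep') i c).map excel_letter)
            ∘ (· + 1)) (pvIdxList g rest 0))
          = (pvIdxList g rest 0).filterMap
              (fun i => (pvRemapSpec keep' i (if b then c + 1 else c)).map excel_letter) := by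
        apply List.filterMap_congr
        intro i _
        simp only [Function.comp]
        rfl
      rw [htail]
      rw [List.zip_cons_cons]
      cases b with
      | true =>
        simp only [reduceIte]
        rw [ih keep' (c + 1) hlen']
        simp only [pvLettersSpec, reduceIte]
        split
        · simp [pvRemapSpec]
        · simp
      | false =>
        simp only [Bool.false_eq_true, reduceIte]
        rw [ih keep' c hlen']
        simp only [pvLettersSpec, Bool.false_eq_true, reduceIte]
        split
        · simp [pvRemapSpec]
        · simp

-- pvLettersSpec over flag/cluster pairs = letters read off the kept clusters
theorem pvLettersSpec_eq_filter (g : String) :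
    ∀ (pairs : List (Bool × List String)) (c : Nat),
    pvLettersSpec g pairs c
      = (((pairs.filterMap (fun p => if p.1 then some p.2 else none)).zipIdx c).filterMap
          (fun p => if p.1.contains g then some (excel_letter p.2) else none)) := by
  intro pairs
  induction pairs with
  | nil => intro c; simp [pvLettersSpec]
  | cons p rest ih =>
    intro c
    cases hp : p.1 with
    | true =>
      simp only [pvLettersSpec, hp, reduceIte, List.filterMap_cons, List.zipIdx_cons,
        List.filterMap_cons]
      rw [ih (c + 1)]
      split <;> simp
    | false =>
      simp only [pvLettersSpec, hp, Bool.false_eq_true, reduceIte, List.filterMap_cons]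
      exact ih c

-- filtering aligned zips reduces to a plain filter
theorem pv_zip_map_left_filterMap (f : List String → Bool) (lg : List (List String)) :
    ((lg.map f).zip lg).filterMap (fun p => if p.1 then some p.2 else none)
      = lg.filter f := by
  induction lg with
  | nil => rfl
  | cons c rest ih =>
    simp only [List.map_cons, List.zip_cons_cons, List.filterMap_cons, List.filter_cons]
    cases h : f c <;> simp [h, ih]

theorem pv_zip_map_right_filterMap (q : PySem.Set String → Bool) (lg : List (List String)) :
    (lg.zip (lg.map PySem.Set.ofList)).filterMap
        (fun p => if q p.2 then none else some p.1)
      = lg.filter (fun c => !q (PySem.Set.ofList c)) := by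
  induction lg with
  | nil => rfl
  | cons c rest ih =>
    simp only [List.map_cons, List.zip_cons_cons, List.filterMap_cons, List.filter_cons]
    cases h : q (PySem.Set.ofList c) <;> simp [h, ih]

theorem pv_foldl_insert_valcongr (gs : List String) (d : PySem.Dict String String)
    (vA vB : String → String) (h : ∀ g ∈ gs, vA g = vB g) :
    gs.foldl (fun fin g => fin.insert g (vA g)) d
      = gs.foldl (fun fin g => fin.insert g (vB g)) d := by
  induction gs generalizing d with
  | nil => rfl
  | cons g gs ih =>
    simp only [List.foldl_cons]
    rw [h g (by simp)]
    exact ih _ (fun g' hg' => h g' (by simp [hg']))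

theorem pv_main (groups : List String) (ns : List (String × List (String × Bool)))
    (hnd : groups.Nodup) :
    compact_letter_display groups ns = compact_letter_display_alt groups ns := by
  have hinitA : ∀ h, (groups.foldl (fun d g => d.insert g ([] : List Nat))
      PySem.Dict.empty).getD h [] = [] :=
    pv_foldl_insert_nil_getD groups _ (fun h => PySem.Dict.getD_empty h [])
  obtain ⟨h1, hmem, hnodup, h4⟩ := pvPhase1_fold ns groups [] []
    (groups.foldl (fun d g => d.insert g ([] : List Nat)) PySem.Dict.empty)
    hnd (by simp) (by simp) (by simp) (fun h => by rw [hinitA h]; rfl)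
  obtain ⟨hclusters, hcne⟩ := pv_clusters_eq ns groups hnd
  set lg := groups.foldl (pvStepR ns) [] with hlg
  have hA1 : (pvPhase1A ns groups).1 = lg := h1
  have hasg : ∀ h, (pvPhase1A ns groups).2.getD h [] = pvIdxList h lg 0 := h4
  set msets := lg.map PySem.Set.ofList with hmsets
  have hne' : ∀ s ∈ msets, s ≠ [] := by
    intro s hs
    obtain ⟨c, hc, rfl⟩ := List.mem_map.mp hs
    intro h0
    have hcnil : c = [] := by
      cases c with
      | nil => rfl
      | cons a as => rw [PySem.Set.ofList_cons] at h0; cases h0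
    rw [hclusters] at hc
    exact hcne c hc hcnil
  have hnd' : ∀ s ∈ msets, s.Nodup := by
    intro s hs
    obtain ⟨c, _, rfl⟩ := List.mem_map.mp hs
    exact PySem.Set.nodup_ofList c
  have hkeep := pvKeepA_eq_map msets hne' hnd'
  have hlen : (pvKeepA msets).length = lg.length := by
    rw [hkeep, hmsets]
    simp
  simp only [compact_letter_display, compact_letter_display_alt, hA1, ← hclusters, ← hmsets]
  refine congrArg PySem.Dict.items (pv_foldl_insert_valcongr groups PySem.Dict.empty _ _ ?_)
  intro g hg
  have hX : ((pvPhase1A ns groups).2.getD g []).filterMap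
      (fun idx => ((pvRemapA (pvKeepA msets)).get? idx).map excel_letter)
      = pvLettersSpec g ((pvKeepA msets).zip lg) 0 := by
    rw [hasg g]
    rw [show (fun idx => ((pvRemapA (pvKeepA msets)).get? idx).map excel_letter)
        = (fun idx => (pvRemapSpec (pvKeepA msets) idx 0).map excel_letter)
      from funext fun idx => by rw [pvRemapA_get]]
    exact pvA_letters_eq g lg (pvKeepA msets) 0 hlen
  have hfilter : ((pvKeepA msets).zip lg).filterMap (fun p => if p.1 then some p.2 else none)
      = (lg.zip msets).filterMap (fun p =>
          if msets.any (fun t => PySem.Set.issubset p.2 t && !PySem.Set.issubset t p.2) then none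
          else some p.1) := by
    conv_rhs => rw [hmsets]
    rw [pv_zip_map_right_filterMap
      (fun s => msets.any (fun t => PySem.Set.issubset s t && !PySem.Set.issubset t s)) lg]
    rw [hkeep, hmsets, List.map_map, pv_zip_map_left_filterMap]
    rfl
  have hY : pvLettersSpec g ((pvKeepA msets).zip lg) 0
      = (((lg.zip msets).filterMap (fun p =>
            if msets.any (fun t => PySem.Set.issubset p.2 t && !PySem.Set.issubset t p.2) then none
            else some p.1)).zipIdx).filterMap
          (fun p => if p.1.contains g then some (excel_letter p.2) else none) := by
    rw [pvLettersSpec_eq_filter, hfilter]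
  rw [hX, hY]

-- ===== VERDICT (by name: the statement is the Claim_ definition above) =====
theorem compact_letter_display_spec : Claim_equal_compact_letter_display := by
  intro groups ns _ hpre
  exact pv_main groups ns hpre.1
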